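-- pv_equiv track=rewrite | github.com/Arsen-hrynevych/xml_parser_app | main.py | extract_xml_elements
-- ===== SOURCE A (Python) =====
-- def extract_xml_elements(xml_content):
--     """
--     Extracts XML elements (tags and text content) from an XML string.
--
--     Args:
--     xml_content (str): The XML data as a string.
--
--     Returns:
--     list: A list of strings containing XML tags and text content.
--
--     Raises:
--     ValueError: If the XML is malformed.
--     """
--     xml_elements = []
--     tag_stack = []
--     index = 0
--     xml_length = len(xml_content)
--
--     while index < xml_length:
--         # Skip whitespace
--         while index < xml_length and xml_content[index] <= " ":
--             index += 1
--
--         if index >= xml_length: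
--             break
--
--         if xml_content[index] == "<":
--             # Tag detection
--             tag_end = xml_content.find(">", index)
--             if tag_end == -1:
--                 raise ValueError("Malformed XML: missing closing '>'")
--
--             full_tag = xml_content[index : tag_end + 1]
--             xml_elements.append(full_tag)
--
--             # Check if it's a closing tag
--             if full_tag[1] == "/":
--                 tag = full_tag[2:-1]
--                 if not tag_stack or tag_stack[-1] != tag:
--                     raise ValueError(f"Malformed XML: mismatched closing tag for <{tag}>")
--                 tag_stack.pop()
--             elif full_tag[-2] != "/":
--                 tag = full_tag[1 : full_tag.find(" ", 1) if " " in full_tag[1:-1] else -1]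
--                 tag_stack.append(tag)
--
--             index = tag_end + 1
--         else:
--             # Text content
--             next_tag = xml_content.find("<", index)
--             if next_tag == -1:
--                 next_tag = xml_length
--
--             text = xml_content[index:next_tag].strip()
--             if text:
--                 xml_elements.append(text)
--
--             index = next_tag
--
--     if tag_stack:
--         raise ValueError(f"Malformed XML: unclosed tags {', '.join(tag_stack)}")
--
--     return xml_elements
-- ===== SOURCE B (Python) =====
-- def extract_xml_elements(xml_content):
--     """Two-pass re-implementation: tokenize into tags/text, then validate nesting."""
--     # Pass 1: tokenize into raw elements (full tags, stripped non-empty text runs).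
--     elements = []
--     i = 0
--     n = len(xml_content)
--     while i < n:
--         if xml_content[i] == "<":
--             end = xml_content.find(">", i)
--             if end == -1:
--                 raise ValueError("Malformed XML: missing closing '>'")
--             elements.append(xml_content[i : end + 1])
--             i = end + 1
--         else:
--             nxt = xml_content.find("<", i)
--             if nxt == -1:
--                 nxt = n
--             text = xml_content[i:nxt].strip()
--             if text:
--                 elements.append(text)
--             i = nxt
--     # Pass 2: validate tag nesting with a stack over the token list.
--     tag_stack = []
--     for el in elements:
--         if el.startswith("<"):
--             if el[1] == "/":
--                 tag = el[2:-1]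
--                 if not tag_stack or tag_stack[-1] != tag:
--                     raise ValueError(f"Malformed XML: mismatched closing tag for <{tag}>")
--                 tag_stack.pop()
--             elif el[-2] != "/":
--                 tag = el[1 : el.find(" ", 1) if " " in el[1:-1] else -1]
--                 tag_stack.append(tag)
--     if tag_stack:
--         raise ValueError(f"Malformed XML: unclosed tags {', '.join(tag_stack)}")
--     return elements
-- ===== Notes on version B (the rewrite author's own statement) =====
-- stated objective: alternative
-- what changed: A's single fused scan that interleaves index arithmetic, element collection and tag-stack bookkeeping is replaced by two separate passes: a tokenizer that builds the flat element list, then an independent stack-validation pass over that token list.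
import Mathlib
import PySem

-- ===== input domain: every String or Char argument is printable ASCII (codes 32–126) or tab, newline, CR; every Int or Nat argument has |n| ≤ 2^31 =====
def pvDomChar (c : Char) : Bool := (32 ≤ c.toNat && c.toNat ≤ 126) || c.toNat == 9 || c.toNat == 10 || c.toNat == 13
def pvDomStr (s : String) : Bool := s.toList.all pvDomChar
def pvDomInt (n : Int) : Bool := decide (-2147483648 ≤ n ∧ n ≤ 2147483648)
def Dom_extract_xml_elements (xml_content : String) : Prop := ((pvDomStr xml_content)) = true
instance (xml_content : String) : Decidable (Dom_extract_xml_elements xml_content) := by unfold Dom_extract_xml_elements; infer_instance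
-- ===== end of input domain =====

-- B replaces A's single fused scan (index arithmetic + stack updates interleaved) by a
-- tokenize pass followed by a separate stack-validation pass over the token list (objective:
-- alternative decomposition, same cost). Where the Python raises ValueError, Pre_ excludes
-- the input and the ports return [] (a junk value, never claimed).

-- ===== PORT A =====
-- One fused loop over the characters: state = (remaining chars, elements so far, tag stack).
-- Each Python `raise` path returns [] (those inputs are outside Pre_, nothing is claimed there).
def pvLoopA : List Char → List String → List String → List String
  | [], els, stack =>
    -- end of the while loop: `if tag_stack: raise ValueError(...)`
    if stack.isEmpty then els else []
  | c :: rest, els, stack =>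
    if c.toNat ≤ 32 then
      -- inner whitespace-skip while loop (`xml_content[index] <= " "`), one char at a time
      pvLoopA rest els stack
    else if hc : c = '<' then
      -- tag_end = xml_content.find(">", index); '<' itself is not '>', so search in rest
      if (rest.dropWhile (· ≠ '>')).isEmpty then []   -- find returned -1: missing '>'
      else
        -- full_tag = xml_content[index : tag_end + 1]; next index = tag_end + 1
        if (rest.takeWhile (· ≠ '>')).head? = some '/' then        -- full_tag[1] == '/'
          match stack with
          | [] => []                                               -- mismatched closing tag
          | t :: st =>
            if t = String.ofList (rest.takeWhile (· ≠ '>')).tail   -- tag = full_tag[2:-1]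
            then pvLoopA ((rest.dropWhile (· ≠ '>')).tail)
                   (els ++ [String.ofList ('<' :: (rest.takeWhile (· ≠ '>') ++ ['>']))]) st
            else []                                                -- mismatched closing tag
        else if (rest.takeWhile (· ≠ '>')).getLastD '<' = '/' then -- full_tag[-2] == '/'
          pvLoopA ((rest.dropWhile (· ≠ '>')).tail)
            (els ++ [String.ofList ('<' :: (rest.takeWhile (· ≠ '>') ++ ['>']))]) stack
        else
          -- tag = full_tag[1 : full_tag.find(" ", 1) if " " in full_tag[1:-1] else -1]
          pvLoopA ((rest.dropWhile (· ≠ '>')).tail)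
            (els ++ [String.ofList ('<' :: (rest.takeWhile (· ≠ '>') ++ ['>']))])
            (String.ofList (if (rest.takeWhile (· ≠ '>')).contains ' '
                            then (rest.takeWhile (· ≠ '>')).takeWhile (· ≠ ' ')
                            else rest.takeWhile (· ≠ '>')) :: stack)
    else
      -- text content up to the next '<' (or end), stripped, appended if non-empty
      pvLoopA ((c :: rest).dropWhile (· ≠ '<'))
        (if (PySem.Chars.strip ((c :: rest).takeWhile (· ≠ '<'))).isEmpty then els
         else els ++ [String.ofList (PySem.Chars.strip ((c :: rest).takeWhile (· ≠ '<')))])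
        stack
  termination_by cs _ _ => cs.length
  decreasing_by
  · simp
  · have h1 := List.length_dropWhile_le (p := (· ≠ '>')) rest
    simp [List.length_tail] at h1 ⊢; omega
  · have h1 := List.length_dropWhile_le (p := (· ≠ '>')) rest
    simp [List.length_tail] at h1 ⊢; omega
  · have h1 := List.length_dropWhile_le (p := (· ≠ '>')) rest
    simp [List.length_tail] at h1 ⊢; omega
  · rw [List.dropWhile_cons_of_pos (by simp [hc])]
    have h1 := List.length_dropWhile_le (p := (· ≠ '<')) rest
    simp at h1 ⊢; omega

def extract_xml_elements (xml_content : String) : List String :=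
  pvLoopA xml_content.toList [] []

-- ===== PORT B =====
-- Pass 1 of Source B: tokenize into full tags and stripped non-empty text runs;
-- `none` is exactly the ValueError "missing closing '>'".
def pvTokenize : List Char → Option (List String)
  | [] => some []
  | c :: rest =>
    if hc : c = '<' then
      if (rest.dropWhile (· ≠ '>')).isEmpty then none   -- missing closing '>'
      else
        match pvTokenize ((rest.dropWhile (· ≠ '>')).tail) with
        | none => none
        | some toks => some (String.ofList ('<' :: (rest.takeWhile (· ≠ '>') ++ ['>'])) :: toks)
    else
      match pvTokenize ((c :: rest).dropWhile (· ≠ '<')) with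
      | none => none
      | some toks =>
        some (if (PySem.Chars.strip ((c :: rest).takeWhile (· ≠ '<'))).isEmpty then toks
              else String.ofList (PySem.Chars.strip ((c :: rest).takeWhile (· ≠ '<'))) :: toks)
  termination_by cs => cs.length
  decreasing_by
  · have h1 := List.length_dropWhile_le (p := (· ≠ '>')) rest
    simp [List.length_tail] at h1 ⊢; omega
  · rw [List.dropWhile_cons_of_pos (by simp [hc])]
    have h1 := List.length_dropWhile_le (p := (· ≠ '<')) rest
    simp at h1 ⊢; omega

-- Pass 2 of Source B: stack validation over the token list. Tokens starting with '<' always have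
-- length ≥ 2 ("<…>"), so the el[1] / el[-2] reads are total there (ported with head?/getLastD).
def pvValidate : List String → List String → Bool
  | [], stack => stack.isEmpty
  | e :: es, stack =>
    if e.toList.head? = some '<' then                      -- el.startswith("<")
      if (e.toList.drop 1).head? = some '/' then           -- el[1] == '/'
        match stack with
        | [] => false                                      -- mismatched closing tag
        | t :: st =>
          if t = String.ofList ((e.toList.drop 1).dropLast.tail)   -- tag = el[2:-1]
          then pvValidate es st
          else false                                       -- mismatched closing tag
      else if e.toList.dropLast.getLastD ' ' = '/' then    -- el[-2] == '/'
        pvValidate es stack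
      else
        -- tag = el[1 : el.find(" ", 1) if " " in el[1:-1] else -1]
        pvValidate es
          (String.ofList (if ((e.toList.drop 1).dropLast).contains ' '
                          then (e.toList.drop 1).takeWhile (· ≠ ' ')
                          else (e.toList.drop 1).dropLast) :: stack)
    else
      pvValidate es stack

def extract_xml_elements_alt (xml_content : String) : List String :=
  match pvTokenize xml_content.toList with
  | none => []   -- ValueError: missing closing '>'
  | some toks => if pvValidate toks [] then toks else []   -- false = ValueError

-- ===== PRECONDITION & SPEC =====
-- Well-formedness of the input under the function's tag grammar, stated as a structural
-- state machine over the characters (no output is built): pvTagStep says how one complete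
-- tag body acts on the stack of open tag names (closing tags must match the innermost open
-- tag, self-closing tags do nothing, opening tags push their name).
def pvTagStep (body : List Char) (stack : List String) : Option (List String) :=
  if body.head? = some '/' then
    match stack with
    | [] => none
    | t :: st => if t = String.ofList body.tail then some st else none
  else if body.getLastD '<' = '/' then some stack
  else some (String.ofList (if body.contains ' ' then body.takeWhile (· ≠ ' ') else body)
        :: stack)

-- State: none = outside a tag; some acc = inside a tag with body read so far.
def pvWellFormed : List Char → Option (List Char) → List String → Bool
  | [], none, stack => stack.isEmpty       -- all opened tags must be closed
  | [], some _, _ => false                 -- a '<' with no matching '>'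
  | c :: rest, none, stack =>
    if c = '<' then pvWellFormed rest (some []) stack else pvWellFormed rest none stack
  | c :: rest, some acc, stack =>
    if c = '>' then
      match pvTagStep acc stack with
      | none => false                      -- mismatched closing tag
      | some st => pvWellFormed rest none st
    else pvWellFormed rest (some (acc ++ [c])) stack

-- Pre_ excludes exactly the malformed inputs on which the Python A raises ValueError
-- (missing '>', mismatched closing tag, unclosed tags); A returns on every input in Pre_.
def Pre_extract_xml_elements (xml_content : String) : Prop :=
  pvWellFormed xml_content.toList none [] = true
instance (xml_content : String) : Decidable (Pre_extract_xml_elements xml_content) := by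
  unfold Pre_extract_xml_elements; infer_instance

def pvWitness_extract_xml_elements : String := "<a x=1> hi <b/> </a>"

def Spec_extract_xml_elements (xml_content : String) (out : List String) : Prop :=
  out = extract_xml_elements_alt xml_content
instance (xml_content : String) (out : List String) : Decidable (Spec_extract_xml_elements xml_content out) := by
  unfold Spec_extract_xml_elements; infer_instance

-- ===== CLAIM (what is proved, stated in full; the proofs are below) =====
def Claim_equal_extract_xml_elements : Prop := ∀ (xml_content : String), Dom_extract_xml_elements xml_content → Pre_extract_xml_elements xml_content → Spec_extract_xml_elements xml_content (extract_xml_elements xml_content)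

-- ===== LEMMAS AND PROOFS =====

-- One-step unfolding lemmas for the three well-founded recursions.
lemma pvLoopA_nil (els stack : List String) :
    pvLoopA [] els stack = if stack.isEmpty then els else [] := by
  rw [pvLoopA]

lemma pvLoopA_ws {c : Char} (h : c.toNat ≤ 32) (rest : List Char) (els stack : List String) :
    pvLoopA (c :: rest) els stack = pvLoopA rest els stack := by
  rw [pvLoopA.eq_def]; simp only [h, if_true]

lemma pvLoopA_lt (rest : List Char) (els stack : List String) :
    pvLoopA ('<' :: rest) els stack =
      if (rest.dropWhile (· ≠ '>')).isEmpty then []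
      else
        if (rest.takeWhile (· ≠ '>')).head? = some '/' then
          match stack with
          | [] => []
          | t :: st =>
            if t = String.ofList (rest.takeWhile (· ≠ '>')).tail
            then pvLoopA ((rest.dropWhile (· ≠ '>')).tail)
                   (els ++ [String.ofList ('<' :: (rest.takeWhile (· ≠ '>') ++ ['>']))]) st
            else []
        else if (rest.takeWhile (· ≠ '>')).getLastD '<' = '/' then
          pvLoopA ((rest.dropWhile (· ≠ '>')).tail)
            (els ++ [String.ofList ('<' :: (rest.takeWhile (· ≠ '>') ++ ['>']))]) stack
        else
          pvLoopA ((rest.dropWhile (· ≠ '>')).tail)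
            (els ++ [String.ofList ('<' :: (rest.takeWhile (· ≠ '>') ++ ['>']))])
            (String.ofList (if (rest.takeWhile (· ≠ '>')).contains ' '
                            then (rest.takeWhile (· ≠ '>')).takeWhile (· ≠ ' ')
                            else rest.takeWhile (· ≠ '>')) :: stack) := by
  rw [pvLoopA.eq_def]; rfl

lemma pvLoopA_text {c : Char} (hws : ¬ c.toNat ≤ 32) (hne : c ≠ '<')
    (rest : List Char) (els stack : List String) :
    pvLoopA (c :: rest) els stack =
      pvLoopA ((c :: rest).dropWhile (· ≠ '<'))
        (if (PySem.Chars.strip ((c :: rest).takeWhile (· ≠ '<'))).isEmpty then els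
         else els ++ [String.ofList (PySem.Chars.strip ((c :: rest).takeWhile (· ≠ '<')))])
        stack := by
  rw [pvLoopA.eq_def]; simp only [hws, if_false, hne, dite_false]

lemma pvTokenize_nil : pvTokenize [] = some [] := by rw [pvTokenize]

lemma pvTokenize_lt (rest : List Char) :
    pvTokenize ('<' :: rest) =
      if (rest.dropWhile (· ≠ '>')).isEmpty then none
      else
        match pvTokenize ((rest.dropWhile (· ≠ '>')).tail) with
        | none => none
        | some toks =>
          some (String.ofList ('<' :: (rest.takeWhile (· ≠ '>') ++ ['>'])) :: toks) := by
  rw [pvTokenize.eq_def]; rfl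

lemma pvTokenize_text {c : Char} (hne : c ≠ '<') (rest : List Char) :
    pvTokenize (c :: rest) =
      match pvTokenize ((c :: rest).dropWhile (· ≠ '<')) with
      | none => none
      | some toks =>
        some (if (PySem.Chars.strip ((c :: rest).takeWhile (· ≠ '<'))).isEmpty then toks
              else String.ofList (PySem.Chars.strip ((c :: rest).takeWhile (· ≠ '<'))) :: toks) := by
  rw [pvTokenize.eq_def]; simp only [hne, dite_false]

lemma pvValidate_nil (stack : List String) : pvValidate [] stack = stack.isEmpty := by
  rw [pvValidate]

lemma pvValidate_cons (e : String) (es stack : List String) :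
    pvValidate (e :: es) stack =
      if e.toList.head? = some '<' then
        if (e.toList.drop 1).head? = some '/' then
          match stack with
          | [] => false
          | t :: st =>
            if t = String.ofList ((e.toList.drop 1).dropLast.tail)
            then pvValidate es st
            else false
        else if e.toList.dropLast.getLastD ' ' = '/' then
          pvValidate es stack
        else
          pvValidate es
            (String.ofList (if ((e.toList.drop 1).dropLast).contains ' '
                            then (e.toList.drop 1).takeWhile (· ≠ ' ')
                            else (e.toList.drop 1).dropLast) :: stack)
      else
        pvValidate es stack := by
  rw [pvValidate.eq_def]



lemma dwlt {c : Char} (hne : c ≠ '<') (rest : List Char) :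
    (c :: rest).dropWhile (· ≠ '<') = rest.dropWhile (· ≠ '<') :=
  List.dropWhile_cons_of_pos (by simp [hne])

lemma twlt {c : Char} (hne : c ≠ '<') (rest : List Char) :
    (c :: rest).takeWhile (· ≠ '<') = c :: rest.takeWhile (· ≠ '<') :=
  List.takeWhile_cons_of_pos (by simp [hne])

lemma pv_strip_cons_space {c : Char} (h : PySem.Chars.isspace c = true) (xs : List Char) :
    PySem.Chars.strip (c :: xs) = PySem.Chars.strip xs := by
  simp [PySem.Chars.strip, PySem.Chars.lstrip, List.dropWhile, h]

lemma pv_strip_cons_not_space {c : Char} (h : PySem.Chars.isspace c = false) (xs : List Char) :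
    PySem.Chars.strip (c :: xs) =
      c :: (List.dropWhile PySem.Chars.isspace xs.reverse).reverse := by
  simp only [PySem.Chars.strip, PySem.Chars.lstrip, PySem.Chars.rstrip,
    List.dropWhile, h, List.reverse_cons]
  rw [List.dropWhile_append]
  by_cases he : (List.dropWhile PySem.Chars.isspace xs.reverse).isEmpty
  · rw [List.isEmpty_iff] at he; rw [he]; simp [List.dropWhile, h]
  · simp [he]

-- Skipping a leading whitespace character does not change B's token list.
lemma pv_tokenize_ws {c : Char} (h : PySem.Chars.isspace c = true) (hne : c ≠ '<')
    (rest : List Char) : pvTokenize (c :: rest) = pvTokenize rest := by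
  rw [pvTokenize_text hne, dwlt hne, twlt hne, pv_strip_cons_space h]
  cases rest with
  | nil => simp [pvTokenize_nil, PySem.Chars.strip, PySem.Chars.lstrip, PySem.Chars.rstrip]
  | cons d r =>
    by_cases hd : d = '<'
    · subst hd
      rw [List.dropWhile_cons_of_neg (by simp), List.takeWhile_cons_of_neg (by simp)]
      cases pvTokenize ('<' :: r) <;>
        simp [PySem.Chars.strip, PySem.Chars.lstrip, PySem.Chars.rstrip]
    · conv_rhs => rw [pvTokenize_text hd]

-- One-step facts about the well-formedness state machine.
lemma pvWellFormed_lt (rest : List Char) (stack : List String) :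
    pvWellFormed ('<' :: rest) none stack = pvWellFormed rest (some []) stack := by
  rw [pvWellFormed]; simp

lemma pv_wf_text {c : Char} (hne : c ≠ '<') (rest : List Char) (stack : List String) :
    pvWellFormed (c :: rest) none stack = pvWellFormed rest none stack := by
  rw [pvWellFormed, if_neg hne]

-- Inside a tag, the state machine consumes exactly up to the first '>'.
lemma pv_wf_some : ∀ (rest acc : List Char) (stack : List String),
    pvWellFormed rest (some acc) stack =
      if (rest.dropWhile (· ≠ '>')).isEmpty then false
      else
        match pvTagStep (acc ++ rest.takeWhile (· ≠ '>')) stack with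
        | none => false
        | some st => pvWellFormed ((rest.dropWhile (· ≠ '>')).tail) none st := by
  intro rest
  induction rest with
  | nil => intro acc stack; rw [pvWellFormed]; simp [List.dropWhile]
  | cons c r ihr =>
    intro acc stack
    by_cases hc : c = '>'
    · subst hc
      rw [pvWellFormed, if_pos rfl,
        List.dropWhile_cons_of_neg (by simp), List.takeWhile_cons_of_neg (by simp)]
      simp
    · rw [pvWellFormed, if_neg hc, ihr,
        List.dropWhile_cons_of_pos (by simp [hc]), List.takeWhile_cons_of_pos (by simp [hc])]
      simp [List.append_assoc]

-- Outside a tag, text characters up to the next '<' are ignored by the state machine.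
lemma pv_wf_dropWhile : ∀ (cs : List Char) (stack : List String),
    pvWellFormed (cs.dropWhile (· ≠ '<')) none stack = pvWellFormed cs none stack := by
  intro cs
  induction cs with
  | nil => intro stack; simp [List.dropWhile]
  | cons c r ih =>
    intro stack
    by_cases hc : c = '<'
    · subst hc; rw [List.dropWhile_cons_of_neg (by simp)]
    · rw [List.dropWhile_cons_of_pos (by simp [hc]), ih, pv_wf_text hc]

lemma pv_all_suffix {l1 l2 : List Char} (h : l1 <:+ l2) (ha : l2.all pvDomChar = true) :
    l1.all pvDomChar = true := by
  rw [List.all_eq_true] at ha ⊢; exact fun x hx => ha x (h.subset hx)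

-- Domain characters of code ≤ 32 are exactly Python whitespace (tab, LF, CR, space).
-- el[-2] of a full tag "<body>" is the last character of body (or '<' when body is empty).
lemma pv_tag_pen (body : List Char) :
    ('<' :: (body ++ ['>'])).dropLast.getLastD ' ' = body.getLastD '<' := by
  rw [show ('<' :: (body ++ ['>'])) = ('<' :: body) ++ ['>'] by simp,
    List.dropLast_concat, List.getLastD_cons]

lemma pv_ws_isspace {c : Char} (hd : pvDomChar c = true) (h : c.toNat ≤ 32) :
    PySem.Chars.isspace c = true := by
  simp [pvDomChar] at hd
  simp [PySem.Chars.isspace]; omega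

lemma pv_nonws_isspace {c : Char} (hd : pvDomChar c = true) (h : ¬ c.toNat ≤ 32) :
    PySem.Chars.isspace c = false := by
  simp [pvDomChar] at hd
  simp [PySem.Chars.isspace]; omega

-- The main invariant: on any well-formed suffix, A's fused loop appends exactly the tokens
-- of B's first pass, and B's second pass accepts those tokens from the same stack.
lemma pv_main : ∀ (n : Nat) (cs : List Char), cs.length ≤ n → cs.all pvDomChar = true →
    ∀ (stack els : List String), pvWellFormed cs none stack = true →
    ∃ toks, pvTokenize cs = some toks ∧ pvValidate toks stack = true ∧
      pvLoopA cs els stack = els ++ toks := by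
  intro n
  induction n with
  | zero =>
    intro cs hlen _ stack els hb
    have hnil : cs = [] := List.eq_nil_of_length_eq_zero (Nat.le_zero.mp hlen)
    subst hnil
    rw [pvWellFormed] at hb
    exact ⟨[], by rw [pvTokenize_nil], by simp [pvValidate_nil, hb],
      by rw [pvLoopA_nil]; simp [hb]⟩
  | succ n ih =>
    intro cs hlen hdom stack els hb
    match cs with
    | [] =>
      rw [pvWellFormed] at hb
      exact ⟨[], by rw [pvTokenize_nil], by simp [pvValidate_nil, hb],
        by rw [pvLoopA_nil]; simp [hb]⟩
    | c :: rest =>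
      simp only [List.all_cons, Bool.and_eq_true] at hdom
      obtain ⟨hdc, hdrest⟩ := hdom
      simp only [List.length_cons, Nat.add_le_add_iff_right] at hlen
      by_cases hlt : c = '<'
      · subst hlt
        rw [pvWellFormed_lt, pv_wf_some, List.nil_append] at hb
        by_cases hdw : (rest.dropWhile (· ≠ '>')).isEmpty
        · rw [if_pos hdw] at hb; simp at hb
        rw [if_neg hdw] at hb
        unfold pvTagStep at hb
        have hrlen : ((rest.dropWhile (· ≠ '>')).tail).length ≤ n := by
          have h1 := List.length_dropWhile_le (p := (· ≠ '>')) rest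
          have h2 : (rest.dropWhile (· ≠ '>')).tail.length
              = (rest.dropWhile (· ≠ '>')).length - 1 := List.length_tail
          omega
        have hdom' : ((rest.dropWhile (· ≠ '>')).tail).all pvDomChar = true :=
          pv_all_suffix ((List.tail_suffix _).trans (List.dropWhile_suffix _)) hdrest
        set body := rest.takeWhile (· ≠ '>') with hbody
        set ftag := String.ofList ('<' :: (body ++ ['>'])) with hftag
        by_cases hcl : body.head? = some '/'
        · rw [if_pos hcl] at hb
          cases stack with
          | nil => simp at hb
          | cons t st =>
            simp only [] at hb
            by_cases hteq : t = String.ofList body.tail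
            · rw [if_pos hteq] at hb
              simp only [] at hb
              obtain ⟨toks, ht, hv, hl⟩ := ih _ hrlen hdom' st (els ++ [ftag]) hb
              refine ⟨ftag :: toks, ?_, ?_, ?_⟩
              · rw [pvTokenize_lt, if_neg hdw, ht]
              · rw [pvValidate_cons]
                simp only [hftag, String.toList_ofList]
                rw [if_pos (by simp)]
                rw [if_pos (by
                  obtain ⟨b0, bt, hb0⟩ : ∃ b0 bt, body = b0 :: bt := by
                    cases hbb : body with
                    | nil => rw [hbb] at hcl; simp at hcl
                    | cons x xs => exact ⟨x, xs, rfl⟩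
                  have hb0' : b0 = '/' := by rw [hb0] at hcl; simpa using hcl
                  rw [hb0, hb0']; simp)]
                rw [if_pos (by rw [List.drop_succ_cons, List.drop_zero,
                  List.dropLast_concat]; exact hteq)]
                exact hv
              · rw [pvLoopA_lt, if_neg hdw]
                rw [if_pos hcl]
                simp only []
                rw [if_pos hteq, hl]
                simp
            · rw [if_neg hteq] at hb; simp at hb
        · rw [if_neg hcl] at hb
          have hcl2 : ¬ ((body ++ ['>']).head? = some '/') := by
            cases hbb : body with
            | nil => simp
            | cons x xs =>
              rw [hbb] at hcl; simp at hcl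
              simp [hcl]
          by_cases hsc : body.getLastD '<' = '/'
          · rw [if_pos hsc] at hb
            simp only [] at hb
            obtain ⟨toks, ht, hv, hl⟩ := ih _ hrlen hdom' stack (els ++ [ftag]) hb
            refine ⟨ftag :: toks, ?_, ?_, ?_⟩
            · rw [pvTokenize_lt, if_neg hdw, ht]
            · rw [pvValidate_cons]
              simp only [hftag, String.toList_ofList]
              rw [if_pos (by simp)]
              rw [if_neg (by simp only [List.drop_succ_cons, List.drop_zero]; exact hcl2)]
              rw [if_pos (by rw [pv_tag_pen]; exact hsc)]
              exact hv
            · rw [pvLoopA_lt, if_neg hdw, if_neg hcl, if_pos hsc, hl]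
              simp
          · rw [if_neg hsc] at hb
            simp only [] at hb
            obtain ⟨toks, ht, hv, hl⟩ := ih _ hrlen hdom'
              (String.ofList (if body.contains ' ' then body.takeWhile (· ≠ ' ') else body)
                :: stack) (els ++ [ftag]) hb
            refine ⟨ftag :: toks, ?_, ?_, ?_⟩
            · rw [pvTokenize_lt, if_neg hdw, ht]
            · rw [pvValidate_cons]
              simp only [hftag, String.toList_ofList]
              rw [if_pos (by simp)]
              rw [if_neg (by simp only [List.drop_succ_cons, List.drop_zero]; exact hcl2)]
              rw [if_neg (by rw [pv_tag_pen]; exact hsc)]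
              simp only [List.drop_succ_cons, List.drop_zero, List.dropLast_concat]
              by_cases hsp2 : body.contains ' '
              · rw [if_pos hsp2]
                rw [List.takeWhile_append]
                rw [if_neg (fun hlen2 => by
                  have hpre := List.takeWhile_prefix (l := body) (p := (· ≠ ' '))
                  have heq2 := hpre.eq_of_length hlen2
                  have hmem := List.mem_of_elem_eq_true hsp2
                  have := List.takeWhile_eq_self_iff.mp heq2 _ hmem
                  simp at this)]
                rw [if_pos hsp2] at hv
                exact hv
              · rw [if_neg hsp2] at hv ⊢
                exact hv
            · rw [pvLoopA_lt, if_neg hdw, if_neg hcl, if_neg hsc, hl]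
              simp
      · by_cases hws : c.toNat ≤ 32
        · have hsp := pv_ws_isspace hdc hws
          rw [pv_wf_text hlt] at hb
          obtain ⟨toks, ht, hv, hl⟩ := ih rest hlen hdrest stack els hb
          refine ⟨toks, ?_, hv, ?_⟩
          · rw [pv_tokenize_ws hsp hlt, ht]
          · rw [pvLoopA_ws hws]; exact hl
        · have hsp := pv_nonws_isspace hdc hws
          rw [← pv_wf_dropWhile (c :: rest) stack, dwlt hlt] at hb
          have hdd : (c :: rest).dropWhile (· ≠ '<') = rest.dropWhile (· ≠ '<') := dwlt hlt rest
          have hdlen : (rest.dropWhile (· ≠ '<')).length ≤ n := by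
            have h1 := List.length_dropWhile_le (p := (· ≠ '<')) rest; omega
          have hdom' : (rest.dropWhile (· ≠ '<')).all pvDomChar = true :=
            pv_all_suffix (List.dropWhile_suffix _) hdrest
          have htxt2 : PySem.Chars.strip ((c :: rest).takeWhile (· ≠ '<')) =
              c :: (List.dropWhile PySem.Chars.isspace
                (rest.takeWhile (· ≠ '<')).reverse).reverse := by
            rw [twlt hlt, pv_strip_cons_not_space hsp]
          obtain ⟨toks, ht, hv, hl⟩ := ih _ hdlen hdom' stack
            (els ++ [String.ofList (PySem.Chars.strip ((c :: rest).takeWhile (· ≠ '<')))]) hb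
          refine ⟨String.ofList (PySem.Chars.strip ((c :: rest).takeWhile (· ≠ '<'))) :: toks,
            ?_, ?_, ?_⟩
          · rw [pvTokenize_text hlt, hdd, ht]
            simp only []
            rw [if_neg (by rw [htxt2]; simp)]
          · rw [pvValidate_cons]
            simp only [String.toList_ofList]
            rw [if_neg (by rw [htxt2]; simp; intro h; exact hlt h)]
            exact hv
          · rw [pvLoopA_text hws hlt]
            rw [if_neg (by rw [htxt2]; simp), hdd, hl]
            simp

-- ===== VERDICT (by name: the statement is the Claim_ definition above) =====
theorem extract_xml_elements_spec : Claim_equal_extract_xml_elements := by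
  intro xml hdom hpre
  unfold Spec_extract_xml_elements extract_xml_elements extract_xml_elements_alt
  obtain ⟨toks, ht, hv, hl⟩ := pv_main xml.toList.length xml.toList le_rfl hdom [] [] hpre
  rw [ht, hl]
  simp [hv]
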